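-- pv_equiv track=rewrite | github.com/hbenarab/mt-iebkg | utils/tools.py | contextwin
-- ===== SOURCE A (Python) =====
-- import math
--
-- def contextwin(l, win):
--     '''
--     win :: int corresponding to the size of the window
--     given a list of indexes composing a sentence
--     it will return a list of list of indexes corresponding
--     to context windows surrounding each word in the sentence
--     '''
--     assert (win % 2) == 1
--     assert win >=1
--     l = list(l)
--
--     lpadded = math.floor(win/2) * [-1] + l + math.floor(win/2) * [-1]
--     out = [ lpadded[i:i+win] for i in range(len(l)) ]
--
--     assert len(out) == len(l)
--     return out
-- ===== SOURCE B (Python) =====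
-- def contextwin(l, win):
--     '''
--     win :: int corresponding to the size of the window
--     given a list of indexes composing a sentence
--     it will return a list of list of indexes corresponding
--     to context windows surrounding each word in the sentence
--     '''
--     assert (win % 2) == 1
--     assert win >= 1
--     l = list(l)
--
--     half = win // 2
--     out = []
--     for i in range(len(l)):
--         window = []
--         for j in range(i - half, i + half + 1):
--             window.append(l[j] if 0 <= j < len(l) else -1)
--         out.append(window)
--     return out
-- ===== Notes on version B (the rewrite author's own statement) =====
-- stated objective: simpler
-- what changed: Replaces the intermediate sentinel-padded list plus slicing by a direct per-position bounds-checked gather over offsets, so no padded buffer is ever built.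
import Mathlib
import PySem

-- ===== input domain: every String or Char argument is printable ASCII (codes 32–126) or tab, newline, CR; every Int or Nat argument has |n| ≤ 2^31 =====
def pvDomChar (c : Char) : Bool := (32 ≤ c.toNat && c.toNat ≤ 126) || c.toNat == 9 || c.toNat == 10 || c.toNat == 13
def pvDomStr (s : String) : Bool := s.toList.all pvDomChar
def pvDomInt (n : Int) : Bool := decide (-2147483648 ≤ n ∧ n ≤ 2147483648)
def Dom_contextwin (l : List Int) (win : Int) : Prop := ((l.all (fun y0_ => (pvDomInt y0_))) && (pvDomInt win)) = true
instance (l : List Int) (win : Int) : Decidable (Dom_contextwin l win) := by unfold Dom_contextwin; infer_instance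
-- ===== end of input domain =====

-- B replaces A's sentinel-padded buffer + slicing by a per-position bounds-checked
-- gather over offsets (objective: simpler — no intermediate padded list).

-- ===== PORT A =====
-- math.floor(win/2) equals win // 2 exactly here: |win| ≤ 2^31, so win/2 is exact in double.
-- Python's 'k * [-1]' is empty for negative k, matching .toNat.
def contextwin (l : List Int) (win : Int) : List (List Int) :=
  let lpadded := List.replicate (PySem.Int.floordiv win 2).toNat (-1 : Int) ++ l
                  ++ List.replicate (PySem.Int.floordiv win 2).toNat (-1 : Int)
  (List.range l.length).map (fun (i : Nat) => PySem.List.slice lpadded (some (i : Int)) (some ((i : Int) + win)))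

-- ===== PORT B =====
def contextwin_alt (l : List Int) (win : Int) : List (List Int) :=
  let half := PySem.Int.floordiv win 2
  (List.range l.length).map (fun (i : Nat) =>
    (PySem.List.pyRange ((i : Int) - half) ((i : Int) + half + 1) 1).map
      (fun j => if 0 ≤ j ∧ j < (l.length : Int) then PySem.List.pyGetD l j (-1) else -1))

-- ===== PRECONDITION & SPEC =====
-- Pre_ excludes exactly the inputs where A's asserts raise AssertionError: win even or win < 1.
def Pre_contextwin (l : List Int) (win : Int) : Prop := PySem.Int.mod win 2 = 1 ∧ 1 ≤ win
instance (l : List Int) (win : Int) : Decidable (Pre_contextwin l win) := by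
  unfold Pre_contextwin; infer_instance
def pvWitness_contextwin : List Int × Int := ([1, 2, 3], 3)

def Spec_contextwin (l : List Int) (win : Int) (out : List (List Int)) : Prop := out = contextwin_alt l win
instance (l : List Int) (win : Int) (out : List (List Int)) : Decidable (Spec_contextwin l win out) := by
  unfold Spec_contextwin; infer_instance

-- ===== CLAIM (what is proved, stated in full; the proofs are below) =====
def Claim_equal_contextwin : Prop := ∀ (l : List Int) (win : Int), Dom_contextwin l win → Pre_contextwin l win → Spec_contextwin l win (contextwin l win)

-- ===== LEMMAS AND PROOFS =====

-- One window: slicing the padded list equals the bounds-checked gather.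
lemma window_eq (l : List Int) (h i : Nat) (hi : i < l.length) :
    PySem.List.slice
      (List.replicate h (-1 : Int) ++ l ++ List.replicate h (-1 : Int))
      (some (i : Int)) (some ((i : Int) + (2 * (h : Int) + 1)))
    = (PySem.List.pyRange ((i : Int) - (h : Int)) ((i : Int) + (h : Int) + 1) 1).map
        (fun j => if 0 ≤ j ∧ j < (l.length : Int) then PySem.List.pyGetD l j (-1) else -1) := by
  have hcast : (i : Int) + (2 * (h : Int) + 1) = ((i + (2 * h + 1) : Nat) : Int) := by push_cast; ring
  rw [hcast, PySem.List.slice_natCast, PySem.List.pyRange_one]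
  have hm : ((i : Int) + (h : Int) + 1 - ((i : Int) - (h : Int))).toNat = 2 * h + 1 := by omega
  rw [hm]
  apply List.ext_getElem
  · simp [List.length_take, List.length_drop, List.length_append, List.length_replicate]
    omega
  · intro k hk1 hk2
    simp only [List.length_take, List.length_drop] at hk1
    have hk : k < 2 * h + 1 := by
      simp only [List.length_append, List.length_replicate] at hk1; omega
    rw [List.getElem_take, List.getElem_drop]
    simp only [List.getElem_map, List.getElem_range]
    have hlen : (List.replicate h (-1 : Int) ++ l).length = h + l.length := by
      simp [List.length_replicate]
    by_cases h1 : i + k < h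
    · -- left padding
      rw [List.getElem_append_left (by simp [hlen]; omega : i + k < (List.replicate h (-1:Int) ++ l).length),
          List.getElem_append_left (by simp; omega : i + k < (List.replicate h (-1:Int)).length)]
      simp only [List.getElem_replicate]
      rw [if_neg (by omega)]
    · by_cases h2 : i + k < h + l.length
      · -- inside l
        rw [List.getElem_append_left (by omega : i + k < (List.replicate h (-1:Int) ++ l).length),
            List.getElem_append_right (show (List.replicate h (-1:Int)).length ≤ i + k by simp; omega)]
        rw [if_pos (by constructor <;> omega)]
        rw [PySem.List.pyGetD_eq_getElem _ _ (by omega) (by omega)]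
        congr 1
        simp
        omega
      · -- right padding
        rw [List.getElem_append_right (show (List.replicate h (-1:Int) ++ l).length ≤ i + k by simp; omega)]
        simp only [List.getElem_replicate]
        rw [if_neg (by omega)]

-- ===== VERDICT (by name: the statement is the Claim_ definition above) =====
theorem contextwin_spec : Claim_equal_contextwin := by
  intro l win _ hpre
  obtain ⟨hmod, hwin⟩ := hpre
  unfold Spec_contextwin contextwin contextwin_alt
  rw [PySem.Int.mod_eq_emod_of_pos (by omega : (0:Int) < 2)] at hmod
  have hfd : PySem.Int.floordiv win 2 = win / 2 := PySem.Int.floordiv_eq_ediv_of_pos (by omega : (0:Int) < 2)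
  set h : Nat := (win / 2).toNat with hh
  have hwin2 : win = 2 * (h : Int) + 1 := by omega
  have hhalf : win / 2 = (h : Int) := by omega
  simp only [hfd, hhalf]
  apply List.map_congr_left
  intro i hi
  rw [List.mem_range] at hi
  rw [hwin2]
  exact window_eq l h i hi
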